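-- pv_equiv track=rewrite | github.com/hzj7510/removelogo | logo处理/imagelogo.py | row_white_line
-- ===== SOURCE A (Python) =====
-- def row_white_line(img):
--     isfirst = True
--     isallwhite = True
--     for index, row_num in enumerate(range(len(img))):
--         isallwhite = True
--         for x in img[row_num]:
--             if(x < 660):
--                 isallwhite = False
--                 isfirst = False
--                 break
--         if not isfirst and isallwhite:
--             return index
-- ===== SOURCE B (Python) =====
-- def row_white_line(img):
--     # materialize a whiteness table once, then search it with list.index
--     white = [not any(x < 660 for x in row) for row in img]
--     try:
--         boundary = white.index(False)          # first non-white row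
--         return white.index(True, boundary + 1) # first all-white row after it
--     except ValueError:
--         return None
-- ===== Notes on version B (the rewrite author's own statement) =====
-- stated objective: alternative
-- what changed: Replaces A's flag-carrying streaming loop over pixels by materializing a boolean per-row whiteness table once and answering with two library index searches on that table (white.index(False), then white.index(True, boundary+1)) under try/except.
import Mathlib
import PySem

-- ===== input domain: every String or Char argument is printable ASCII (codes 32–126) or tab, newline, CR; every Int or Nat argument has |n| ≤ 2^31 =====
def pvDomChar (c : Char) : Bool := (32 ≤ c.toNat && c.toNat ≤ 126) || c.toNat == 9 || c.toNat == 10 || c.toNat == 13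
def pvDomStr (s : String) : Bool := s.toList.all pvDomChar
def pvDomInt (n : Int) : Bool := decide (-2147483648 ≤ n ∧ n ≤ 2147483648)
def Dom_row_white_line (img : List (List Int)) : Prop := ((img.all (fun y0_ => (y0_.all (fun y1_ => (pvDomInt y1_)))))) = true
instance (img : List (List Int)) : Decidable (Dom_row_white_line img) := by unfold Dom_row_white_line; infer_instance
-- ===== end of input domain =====

-- B replaces A's flag-carrying streaming loop by a precomputed boolean per-row
-- whiteness table searched twice with list.index (first False, then first True
-- after it); objective: alternative. Equivalence proved on all inputs (A is total).


-- ===== PORT A =====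
-- A's outer loop over rows, carrying the index and the isfirst flag; the inner
-- for/break over a row is the short-circuit List.any (x < 660), isallwhite its negation.
def pvAuxA : List (List Int) → Nat → Bool → Option Int
  | [], _, _ => none
  | r :: rs, index, isfirst =>
    let isallwhite := !(r.any (fun x => decide (x < 660)))
    let isfirst' := isfirst && isallwhite
    if (!isfirst') && isallwhite then some (index : Int)
    else pvAuxA rs (index + 1) isfirst'

def row_white_line (img : List (List Int)) : Option Int := pvAuxA img 0 true

-- ===== PORT B =====
-- the comprehension building the whiteness table
def pvWhite (img : List (List Int)) : List Bool :=
  img.map (fun r => !(r.any (fun x => decide (x < 660))))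

-- white.index(v) is PySem.List.index? (none = ValueError, caught as None);
-- white.index(True, b+1) with a start argument is b+1 + index in the dropped tail.
def row_white_line_alt (img : List (List Int)) : Option Int :=
  let white := pvWhite img
  match PySem.List.index? white false with
  | none => none
  | some b => (PySem.List.index? (white.drop (b + 1)) true).map (fun j => ((b + 1 + j : Nat) : Int))

-- ===== PRECONDITION & SPEC =====
def Spec_row_white_line (img : List (List Int)) (out : Option Int) : Prop := out = row_white_line_alt img
instance (img : List (List Int)) (out : Option Int) : Decidable (Spec_row_white_line img out) := by unfold Spec_row_white_line; infer_instance

-- ===== CLAIM (what is proved, stated in full; the proofs are below) =====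
def Claim_equal_row_white_line : Prop := ∀ (img : List (List Int)), Dom_row_white_line img → Spec_row_white_line img (row_white_line img)

-- ===== LEMMAS AND PROOFS =====
-- once isfirst is false, A's loop searches for the next all-white row: B's second index search
theorem pvAuxA_false (rs : List (List Int)) : ∀ i : Nat,
    pvAuxA rs i false = (PySem.List.index? (pvWhite rs) true).map (fun j => ((i + j : Nat) : Int)) := by
  induction rs with
  | nil => intro i; rfl
  | cons r rs ih =>
    intro i
    by_cases h : r.any (fun x => decide (x < 660)) = true
    · rw [show pvWhite (r :: rs) = false :: pvWhite rs by simp [pvWhite, h],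
        PySem.List.index?_cons_of_ne (pvWhite rs) (by simp),
        show pvAuxA (r :: rs) i false = pvAuxA rs (i + 1) false by simp [pvAuxA, h],
        ih, Option.map_map]
      congr 1; funext j; simp only [Function.comp_apply]; congr 1; omega
    · rw [show pvWhite (r :: rs) = true :: pvWhite rs by simp [pvWhite, h],
        PySem.List.index?_cons_self]
      simp [pvAuxA, h]

-- while isfirst is true, A is B's first index search followed by the second on the dropped tail
theorem pvAuxA_true (rs : List (List Int)) : ∀ i : Nat,
    pvAuxA rs i true =
      (match PySem.List.index? (pvWhite rs) false with
       | none => none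
       | some b => (PySem.List.index? ((pvWhite rs).drop (b + 1)) true).map
           (fun j => ((i + b + 1 + j : Nat) : Int))) := by
  induction rs with
  | nil => intro i; rfl
  | cons r rs ih =>
    intro i
    by_cases h : r.any (fun x => decide (x < 660)) = true
    · rw [show pvWhite (r :: rs) = false :: pvWhite rs by simp [pvWhite, h],
        PySem.List.index?_cons_self]
      simp only [List.drop_succ_cons, List.drop_zero]
      rw [show pvAuxA (r :: rs) i true = pvAuxA rs (i + 1) false by simp [pvAuxA, h],
        pvAuxA_false]
    · rw [show pvWhite (r :: rs) = true :: pvWhite rs by simp [pvWhite, h],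
        PySem.List.index?_cons_of_ne (pvWhite rs) (by simp),
        show pvAuxA (r :: rs) i true = pvAuxA rs (i + 1) true by simp [pvAuxA, h],
        ih]
      cases hb : PySem.List.index? (pvWhite rs) false with
      | none => simp
      | some b =>
        simp only [Option.map_some, List.drop_succ_cons]
        congr 1; funext j; congr 1; omega

-- ===== VERDICT (by name: the statement is the Claim_ definition above) =====
theorem row_white_line_spec : Claim_equal_row_white_line := by
  intro img _
  unfold Spec_row_white_line row_white_line row_white_line_alt
  rw [pvAuxA_true img 0]
  simp only [PySem.List.index?_eq_idxOf?]
  cases hb : List.idxOf? false (pvWhite img) with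
  | none => rfl
  | some b =>
    simp only []
    congr 1; funext j; congr 1; omega
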